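-- pv_equiv track=rewrite | github.com/JohnMai1994/CS116-2018_Winter_Term | CS116/a06-j4mai/a06-j4mai/a06q2.py | find_bigger
-- ===== SOURCE A (Python) =====
-- def find_bigger(ints):
--     if ints==[]:
--         return []
--     else:
--         num = -1
--         z = [ints[0]]
--         max_num = ints[0]
--         for k in ints:
--             if max_num < k:
--                 max_num = max(max_num, k)
--                 z.append(k)
--                 num +=1
--             else:
--                 num +=1
--         return z
-- ===== SOURCE B (Python) =====
-- def find_bigger(ints):
--     if not ints:
--         return []
--     # phase 1: prefix running-maximum table, runmax[i] = max(ints[0..i])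
--     runmax = []
--     m = ints[0]
--     for x in ints:
--         m = m if m > x else x
--         runmax.append(m)
--     # phase 2: keep first element, then each ints[i] strictly above runmax[i-1]
--     return [ints[0]] + [x for r, x in zip(runmax, ints[1:]) if x > r]
-- ===== Notes on version B (the rewrite author's own statement) =====
-- stated objective: alternative
-- what changed: A's single fused scan carrying (num, result, running max) is replaced by a two-phase pass: first build the prefix running-maximum table, then select ints[i] whenever it strictly exceeds the table entry for the previous prefix (via zip).
import Mathlib
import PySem

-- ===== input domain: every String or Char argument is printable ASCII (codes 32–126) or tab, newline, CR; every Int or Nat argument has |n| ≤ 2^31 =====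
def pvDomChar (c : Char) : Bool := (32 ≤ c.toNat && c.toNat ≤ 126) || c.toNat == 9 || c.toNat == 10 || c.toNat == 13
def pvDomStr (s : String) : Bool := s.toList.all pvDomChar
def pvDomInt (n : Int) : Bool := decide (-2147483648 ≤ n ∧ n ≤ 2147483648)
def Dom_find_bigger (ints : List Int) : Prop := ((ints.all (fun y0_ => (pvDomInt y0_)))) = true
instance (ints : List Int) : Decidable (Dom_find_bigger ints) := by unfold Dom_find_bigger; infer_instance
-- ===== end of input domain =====

-- B replaces A's single fused scan by a two-phase pass (prefix-maximum table, then selection by zip); same cost, alternative structure.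

-- ===== PORT A =====
-- A's loop state: (num, z, max_num); num is dead but A maintains it.
def stepA (s : Int × List Int × Int) (k : Int) : Int × List Int × Int :=
  if s.2.2 < k then (s.1 + 1, s.2.1 ++ [k], max s.2.2 k) else (s.1 + 1, s.2.1, s.2.2)

def find_bigger (ints : List Int) : List Int :=
  match ints with
  | [] => []
  | h :: _ =>
    let st := ints.foldl stepA (-1, [h], h)
    st.2.1

-- ===== PORT B =====
-- phase-1 step: extend the running-maximum table (state: table so far, current max)
def stepB (s : List Int × Int) (x : Int) : List Int × Int :=
  let m := if s.2 > x then s.2 else x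
  (s.1 ++ [m], m)

def find_bigger_alt (ints : List Int) : List Int :=
  match ints with
  | [] => []
  | h :: t =>
    let p := ints.foldl stepB ([], h)
    h :: (((p.1.zip t).filter (fun rx => rx.2 > rx.1)).map (fun rx => rx.2))

-- ===== PRECONDITION & SPEC =====
def Spec_find_bigger (ints : List Int) (out : List Int) : Prop := out = find_bigger_alt ints
instance (ints : List Int) (out : List Int) : Decidable (Spec_find_bigger ints out) := by unfold Spec_find_bigger; infer_instance

-- ===== CLAIM (what is proved, stated in full; the proofs are below) =====
def Claim_equal_find_bigger : Prop := ∀ (ints : List Int), Dom_find_bigger ints → Spec_find_bigger ints (find_bigger ints)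

-- ===== LEMMAS AND PROOFS =====

-- the strict prefix-maxima A selects after the first element
def sel : List Int → Int → List Int
  | [], _ => []
  | x :: t, m => if m < x then x :: sel t x else sel t m

-- B's prefix-maximum table over t starting from max m
def pm : List Int → Int → List Int
  | [], _ => []
  | x :: t, m => (if m > x then m else x) :: pm t (if m > x then m else x)

theorem foldA_z (t : List Int) : ∀ (num : Int) (z : List Int) (m : Int),
    (t.foldl stepA (num, z, m)).2.1 = z ++ sel t m := by
  induction t with
  | nil => intro num z m; simp [sel]
  | cons x t ih =>
    intro num z m
    by_cases h : m < x
    · simp [List.foldl_cons, stepA, h, sel, ih, max_eq_right (le_of_lt h)]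
    · simp [List.foldl_cons, stepA, h, sel, ih]

theorem foldB_table (t : List Int) : ∀ (acc : List Int) (m : Int),
    (t.foldl stepB (acc, m)).1 = acc ++ pm t m := by
  induction t with
  | nil => intro acc m; simp [pm]
  | cons x t ih => intro acc m; simp [List.foldl_cons, stepB, pm, ih]

theorem zip_pm_sel (t : List Int) : ∀ (m : Int),
    (((m :: pm t m).zip t).filter (fun rx => rx.2 > rx.1)).map (fun rx => rx.2) = sel t m := by
  induction t with
  | nil => intro m; simp [sel]
  | cons x t ih =>
    intro m
    by_cases h : m < x
    · have hmx : (if m > x then m else x) = x := by split <;> omega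
      simp only [pm, hmx, List.zip_cons_cons, List.filter_cons, sel]
      simp [h, ih x]
    · have hmx : (if m > x then m else x) = m := by split <;> omega
      simp only [pm, hmx, List.zip_cons_cons, List.filter_cons, sel]
      simp [h, ih m]

-- ===== VERDICT (by name: the statement is the Claim_ definition above) =====
theorem find_bigger_spec : Claim_equal_find_bigger := by
  intro ints _
  unfold Spec_find_bigger find_bigger find_bigger_alt
  cases ints with
  | nil => rfl
  | cons h t =>
    have hA : ((h :: t).foldl stepA (-1, [h], h)).2.1 = [h] ++ sel t h := by
      have : stepA (-1, [h], h) h = (0, [h], h) := by simp [stepA]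
      rw [List.foldl_cons, this, foldA_z]
    have hB : ((h :: t).foldl stepB ([], h)).1 = h :: pm t h := by
      have : stepB ([], h) h = ([h], h) := by simp [stepB]
      rw [List.foldl_cons, this, foldB_table]; rfl
    simp only [hA, hB, zip_pm_sel]
    rfl
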